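-- pv_equiv track=rewrite | github.com/PolarBearITS/google-foobar | level2/level2solution1.py | connection
-- ===== SOURCE A (Python) =====
-- def connection(n, route=[]):
-- 	c = []
-- 	for i in [1, 2]:
-- 		for j in [-1, 1]:
-- 			for k in [-1, 1]:
-- 				g = n + 8*i*j + k*(3-i)
-- 				if -1 < g < 64 and 0 < abs(n%8 - g%8) < 3 and n//8 != g//8 and g not in route:
-- 					c.append(g)
-- 	return c
-- ===== SOURCE B (Python) =====
-- _DELTAS = (-10, -6, 6, 10, -17, -15, 15, 17)
-- # table built once: for each start column c, the linear deltas whose column shift keeps the file on the board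
-- _COL_MOVES = [[d for d in _DELTAS if 0 <= c + ((d + 2) % 8 - 2) < 8] for c in range(8)]
--
-- def connection(n, route=[]):
-- 	out = []
-- 	for d in _COL_MOVES[n % 8]:
-- 		g = n + d
-- 		if 0 <= g < 64 and g not in route:
-- 			out.append(g)
-- 	return out
-- ===== Notes on version B (the rewrite author's own statement) =====
-- stated objective: alternative
-- what changed: B precomputes once a per-column table of the candidate linear deltas (indexed by n%8), so each call is a single loop over the table entry with only a 0<=g<64 range test and the route membership test, instead of A's triple nested loop generating offsets by formula and filtering with the modular wrap guard abs(n%8-g%8) and the n//8!=g//8 row check.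
import Mathlib
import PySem

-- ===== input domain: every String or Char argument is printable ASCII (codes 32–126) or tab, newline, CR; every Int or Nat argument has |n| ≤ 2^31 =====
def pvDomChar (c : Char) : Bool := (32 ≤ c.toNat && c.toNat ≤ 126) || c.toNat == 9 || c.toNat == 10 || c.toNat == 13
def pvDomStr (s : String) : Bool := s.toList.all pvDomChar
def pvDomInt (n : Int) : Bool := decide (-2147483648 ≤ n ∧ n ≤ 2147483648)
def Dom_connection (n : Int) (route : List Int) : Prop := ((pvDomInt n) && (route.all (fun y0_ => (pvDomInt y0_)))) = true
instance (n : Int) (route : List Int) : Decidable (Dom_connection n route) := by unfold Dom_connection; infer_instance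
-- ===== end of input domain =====

-- B replaces A's nested offset generation and modular wrap guard by a per-column candidate-delta table built once (alternative decomposition; same cost).

-- ===== PORT A =====
def connection (n : Int) (route : List Int) : List Int :=
  [(1 : Int), 2].foldl (fun c i =>
    [(-1 : Int), 1].foldl (fun c j =>
      [(-1 : Int), 1].foldl (fun c k =>
        if (-1 < n + 8*i*j + k*(3-i) ∧ n + 8*i*j + k*(3-i) < 64) ∧
           (0 < |PySem.Int.mod n 8 - PySem.Int.mod (n + 8*i*j + k*(3-i)) 8| ∧
            |PySem.Int.mod n 8 - PySem.Int.mod (n + 8*i*j + k*(3-i)) 8| < 3) ∧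
           PySem.Int.floordiv n 8 ≠ PySem.Int.floordiv (n + 8*i*j + k*(3-i)) 8 ∧
           (n + 8*i*j + k*(3-i)) ∉ route
        then c ++ [n + 8*i*j + k*(3-i)] else c) c) c) []

-- ===== PORT B =====
def pvDeltas : List Int := [-10, -6, 6, 10, -17, -15, 15, 17]

-- the module-level table _COL_MOVES of Source B, built once
def pvColMoves : List (List Int) :=
  (PySem.List.pyRange 0 8 1).map (fun c =>
    pvDeltas.filter (fun d =>
      decide (0 ≤ c + (PySem.Int.mod (d + 2) 8 - 2) ∧ c + (PySem.Int.mod (d + 2) 8 - 2) < 8)))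

def connection_alt (n : Int) (route : List Int) : List Int :=
  -- _COL_MOVES[n % 8]: the index n % 8 is always in range 0..7, so pyGet? never returns none
  ((PySem.List.pyGet? pvColMoves (PySem.Int.mod n 8)).getD []).foldl (fun out d =>
    if (0 ≤ n + d ∧ n + d < 64) ∧ (n + d) ∉ route then out ++ [n + d] else out) []

-- ===== PRECONDITION & SPEC =====
def Spec_connection (n : Int) (route : List Int) (out : List Int) : Prop := out = connection_alt n route
instance (n : Int) (route : List Int) (out : List Int) : Decidable (Spec_connection n route out) := by unfold Spec_connection; infer_instance

-- ===== CLAIM (what is proved, stated in full; the proofs are below) =====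
def Claim_equal_connection : Prop := ∀ (n : Int) (route : List Int), Dom_connection n route → Spec_connection n route (connection n route)

-- ===== LEMMAS AND PROOFS =====

-- one step kept on both sides: equal conditions, the same appended value, equal accumulators
theorem ite_step {C C' : Prop} [Decidable C] [Decidable C'] {g : Int} {acc acc' : List Int}
    (hC : C ↔ C') (hacc : acc = acc') :
    (if C then acc ++ [g] else acc) = (if C' then acc' ++ [g] else acc') := by
  subst hacc
  by_cases h : C
  · rw [if_pos h, if_pos (hC.mp h)]
  · rw [if_neg h, if_neg (fun h' => h (hC.mpr h'))]

-- a step of A whose condition is false (the delta is absent from B's table for this column)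
theorem ite_drop {C : Prop} [Decidable C] {g : Int} {acc rhs : List Int}
    (hC : ¬ C) (hacc : acc = rhs) :
    (if C then acc ++ [g] else acc) = rhs := by
  rw [if_neg hC]; exact hacc

set_option maxHeartbeats 2000000 in
theorem connection_eq_alt (n : Int) (route : List Int) :
    connection n route = connection_alt n route := by
  have hc : n % 8 = 0 ∨ n % 8 = 1 ∨ n % 8 = 2 ∨ n % 8 = 3 ∨ n % 8 = 4 ∨ n % 8 = 5 ∨
      n % 8 = 6 ∨ n % 8 = 7 := by omega
  have h0 : (PySem.List.pyGet? pvColMoves (0 : Int)).getD [] = [-6, 10, -15, 17] := by decide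
  have h1 : (PySem.List.pyGet? pvColMoves (1 : Int)).getD [] = [-6, 10, -17, -15, 15, 17] := by decide
  have h2 : (PySem.List.pyGet? pvColMoves (2 : Int)).getD [] = [-10, -6, 6, 10, -17, -15, 15, 17] := by decide
  have h3 : (PySem.List.pyGet? pvColMoves (3 : Int)).getD [] = [-10, -6, 6, 10, -17, -15, 15, 17] := by decide
  have h4 : (PySem.List.pyGet? pvColMoves (4 : Int)).getD [] = [-10, -6, 6, 10, -17, -15, 15, 17] := by decide
  have h5 : (PySem.List.pyGet? pvColMoves (5 : Int)).getD [] = [-10, -6, 6, 10, -17, -15, 15, 17] := by decide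
  have h6 : (PySem.List.pyGet? pvColMoves (6 : Int)).getD [] = [-10, 6, -17, -15, 15, 17] := by decide
  have h7 : (PySem.List.pyGet? pvColMoves (7 : Int)).getD [] = [-10, 6, -17, 15] := by decide
  unfold connection connection_alt
  simp only [PySem.Int.mod_eq_emod_of_pos (show (0:Int) < 8 by norm_num),
    PySem.Int.floordiv_eq_ediv_of_pos (show (0:Int) < 8 by norm_num)]
  simp only [List.foldl_cons, List.foldl_nil]
  rw [show n + 8*1*(-1) + (-1)*(3-1) = n + -10 from by ring,
      show n + 8*1*(-1) + 1*(3-1) = n + -6 from by ring,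
      show n + 8*1*1 + (-1)*(3-1) = n + 6 from by ring,
      show n + 8*1*1 + 1*(3-1) = n + 10 from by ring,
      show n + 8*2*(-1) + (-1)*(3-2) = n + -17 from by ring,
      show n + 8*2*(-1) + 1*(3-2) = n + -15 from by ring,
      show n + 8*2*1 + (-1)*(3-2) = n + 15 from by ring,
      show n + 8*2*1 + 1*(3-2) = n + 17 from by ring]
  rcases hc with hc | hc | hc | hc | hc | hc | hc | hc <;> rw [hc]
  · rw [h0]
    simp only [List.foldl_cons, List.foldl_nil]
    refine ite_step ?_ (ite_drop ?_ (ite_step ?_ (ite_drop ?_ (ite_step ?_ (ite_drop ?_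
      (ite_step ?_ (ite_drop ?_ rfl))))))) <;>
      first
      | (simp only [abs_pos, abs_lt, ← and_assoc]; exact and_congr_left' (by omega))
      | (rintro ⟨-, hA, -⟩; simp only [abs_pos, abs_lt] at hA; omega)
  · rw [h1]
    simp only [List.foldl_cons, List.foldl_nil]
    refine ite_step ?_ (ite_step ?_ (ite_step ?_ (ite_step ?_ (ite_step ?_ (ite_drop ?_
      (ite_step ?_ (ite_drop ?_ rfl))))))) <;>
      first
      | (simp only [abs_pos, abs_lt, ← and_assoc]; exact and_congr_left' (by omega))
      | (rintro ⟨-, hA, -⟩; simp only [abs_pos, abs_lt] at hA; omega)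
  · rw [h2]
    simp only [List.foldl_cons, List.foldl_nil]
    refine ite_step ?_ (ite_step ?_ (ite_step ?_ (ite_step ?_ (ite_step ?_ (ite_step ?_
      (ite_step ?_ (ite_step ?_ rfl))))))) <;>
      (simp only [abs_pos, abs_lt, ← and_assoc]; exact and_congr_left' (by omega))
  · rw [h3]
    simp only [List.foldl_cons, List.foldl_nil]
    refine ite_step ?_ (ite_step ?_ (ite_step ?_ (ite_step ?_ (ite_step ?_ (ite_step ?_
      (ite_step ?_ (ite_step ?_ rfl))))))) <;>
      (simp only [abs_pos, abs_lt, ← and_assoc]; exact and_congr_left' (by omega))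
  · rw [h4]
    simp only [List.foldl_cons, List.foldl_nil]
    refine ite_step ?_ (ite_step ?_ (ite_step ?_ (ite_step ?_ (ite_step ?_ (ite_step ?_
      (ite_step ?_ (ite_step ?_ rfl))))))) <;>
      (simp only [abs_pos, abs_lt, ← and_assoc]; exact and_congr_left' (by omega))
  · rw [h5]
    simp only [List.foldl_cons, List.foldl_nil]
    refine ite_step ?_ (ite_step ?_ (ite_step ?_ (ite_step ?_ (ite_step ?_ (ite_step ?_
      (ite_step ?_ (ite_step ?_ rfl))))))) <;>
      (simp only [abs_pos, abs_lt, ← and_assoc]; exact and_congr_left' (by omega))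
  · rw [h6]
    simp only [List.foldl_cons, List.foldl_nil]
    refine ite_step ?_ (ite_step ?_ (ite_step ?_ (ite_step ?_ (ite_drop ?_ (ite_step ?_
      (ite_drop ?_ (ite_step ?_ rfl))))))) <;>
      first
      | (simp only [abs_pos, abs_lt, ← and_assoc]; exact and_congr_left' (by omega))
      | (rintro ⟨-, hA, -⟩; simp only [abs_pos, abs_lt] at hA; omega)
  · rw [h7]
    simp only [List.foldl_cons, List.foldl_nil]
    refine ite_drop ?_ (ite_step ?_ (ite_drop ?_ (ite_step ?_ (ite_drop ?_ (ite_step ?_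
      (ite_drop ?_ (ite_step ?_ rfl))))))) <;>
      first
      | (simp only [abs_pos, abs_lt, ← and_assoc]; exact and_congr_left' (by omega))
      | (rintro ⟨-, hA, -⟩; simp only [abs_pos, abs_lt] at hA; omega)

-- ===== VERDICT (by name: the statement is the Claim_ definition above) =====
theorem connection_spec : Claim_equal_connection := by
  intro n route _
  unfold Spec_connection
  exact connection_eq_alt n route
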